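-- pv_equiv track=rewrite | github.com/caiyueliang/wenet | examples/qudian/s0/tools/gen_wav_scp.py | _split_n
-- ===== SOURCE A (Python) =====
-- def _split_n(file_list, split):
--     file_groups = []
--     file_len = len(file_list)
--     num = file_len % split
--     append_list = [1 if x < num else 0 for x in range(split)]
--     n = file_len // split
--     for i in range(split):
--         sub_file_list = file_list[i*n + sum(append_list[0:i]): (i+1)*n + sum(append_list[0:i+1])]
--         file_groups.append(sub_file_list)
--     return file_groups
-- ===== SOURCE B (Python) =====
-- def _split_n(file_list, split):
--     file_groups = []
--     rest = file_list
--     r = split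
--     while r > 0:
--         k = -(-len(rest) // r)
--         file_groups.append(rest[:k])
--         rest = rest[k:]
--         r -= 1
--     return file_groups
-- ===== Notes on version B (the rewrite author's own statement) =====
-- stated objective: alternative
-- what changed: B never computes the remainder-indicator list, divmod sizes or global slice indices: it greedily consumes the remaining list, each step taking ceil(len(rest)/remaining_groups) elements as the next chunk.
import Mathlib
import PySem

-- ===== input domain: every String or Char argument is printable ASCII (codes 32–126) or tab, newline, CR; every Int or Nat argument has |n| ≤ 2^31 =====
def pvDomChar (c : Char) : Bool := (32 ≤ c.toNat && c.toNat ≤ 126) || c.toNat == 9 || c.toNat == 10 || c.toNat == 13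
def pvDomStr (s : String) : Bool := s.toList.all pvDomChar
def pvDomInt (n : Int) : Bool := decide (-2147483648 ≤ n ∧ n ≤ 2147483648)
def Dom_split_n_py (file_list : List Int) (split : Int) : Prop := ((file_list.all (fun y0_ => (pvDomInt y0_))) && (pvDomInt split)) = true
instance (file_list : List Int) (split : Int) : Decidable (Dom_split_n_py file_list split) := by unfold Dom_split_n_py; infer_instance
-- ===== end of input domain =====

-- B replaces A's global-index slicing with per-iteration prefix sums of an indicator list by a
-- greedy pass that consumes the remaining list, taking ceil(len(rest)/remaining) elements each
-- step; objective: alternative (a genuinely different algorithm for the same balanced split).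

-- ===== PORT A =====
def split_n_py (file_list : List Int) (split : Int) : List (List Int) :=
  let file_len : Int := file_list.length
  let num : Int := PySem.Int.mod file_len split
  let append_list : List Int :=
    (PySem.List.pyRange 0 split 1).map (fun x => if x < num then (1:Int) else 0)
  let n : Int := PySem.Int.floordiv file_len split
  (PySem.List.pyRange 0 split 1).foldl (fun file_groups i =>
    file_groups ++
      [PySem.List.slice file_list
        (some (i * n + (PySem.List.slice append_list (some 0) (some i)).sum))
        (some ((i + 1) * n + (PySem.List.slice append_list (some 0) (some (i + 1))).sum))]) []

-- ===== PORT B =====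
-- B's while loop: state (rest, r, file_groups); each step takes k = -(-len(rest) // r) elements.
def splitAltGo (rest : List Int) (r : Int) (file_groups : List (List Int)) : List (List Int) :=
  if h : 0 < r then
    let k : Int := -(PySem.Int.floordiv (-(rest.length : Int)) r)
    splitAltGo (PySem.List.slice rest (some k) none) (r - 1)
      (file_groups ++ [PySem.List.slice rest none (some k)])
  else file_groups
termination_by r.toNat
decreasing_by omega

def split_n_py_alt (file_list : List Int) (split : Int) : List (List Int) :=
  splitAltGo file_list split []

-- ===== PRECONDITION & SPEC =====
-- Pre_ excludes split = 0, where A raises ZeroDivisionError on len(file_list) % split.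
def Pre_split_n_py (file_list : List Int) (split : Int) : Prop := split ≠ 0
instance (file_list : List Int) (split : Int) : Decidable (Pre_split_n_py file_list split) := by unfold Pre_split_n_py; infer_instance
def pvWitness_split_n_py : List Int × Int := ([1, 2, 3, 4, 5], 2)

def Spec_split_n_py (file_list : List Int) (split : Int) (out : List (List Int)) : Prop := out = split_n_py_alt file_list split
instance (file_list : List Int) (split : Int) (out : List (List Int)) : Decidable (Spec_split_n_py file_list split out) := by unfold Spec_split_n_py; infer_instance

-- ===== CLAIM (what is proved, stated in full; the proofs are below) =====
def Claim_equal_split_n_py : Prop := ∀ (file_list : List Int) (split : Int), Dom_split_n_py file_list split → Pre_split_n_py file_list split → Spec_split_n_py file_list split (split_n_py file_list split)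

-- ===== LEMMAS AND PROOFS =====

-- boundary of group i in the balanced split: i*n + min i num
def pvBnd (n num : Int) (i : Int) : Int := i * n + min i num

-- prefix sums of the 0/1 indicator list: sum of the first k entries is min k num (for num ≥ 0 capped)
theorem pv_sum_take (num : Int) (m : Nat) :
    ((List.range m).map (fun k : Nat => if (k : Int) < num then (1:Int) else 0)).sum
      = if (m : Int) ≤ num then (m : Int) else max num 0 := by
  induction m with
  | zero => simp; omega
  | succ m ih =>
    rw [List.range_succ, List.map_append, List.sum_append, ih]
    simp only [List.map_cons, List.map_nil, List.sum_cons, List.sum_nil]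
    push_cast
    split_ifs <;> omega

-- fold of append-singleton is map
theorem pv_foldl_append_map {α β : Type} (g : α → β) (xs : List α) (init : List β) :
    xs.foldl (fun acc i => acc ++ [g i]) init = init ++ xs.map g := by
  induction xs generalizing init with
  | nil => simp
  | cons x xs ih => simp [ih]

-- A equals the closed-form boundary map (split > 0)
theorem pv_A_eq_map (file_list : List Int) (split : Int) (hpos : 0 < split) :
    split_n_py file_list split
      = (List.range split.toNat).map (fun i : Nat =>
          PySem.List.slice file_list
            (some (pvBnd (PySem.Int.floordiv (file_list.length : Int) split)
                         (PySem.Int.mod (file_list.length : Int) split) (i : Int)))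
            (some (pvBnd (PySem.Int.floordiv (file_list.length : Int) split)
                         (PySem.Int.mod (file_list.length : Int) split) ((i : Int) + 1)))) := by
  unfold split_n_py
  set L : Int := (file_list.length : Int) with hL
  set num : Int := PySem.Int.mod L split with hnum
  set n : Int := PySem.Int.floordiv L split with hn
  have hnum0 : 0 ≤ num := PySem.Int.mod_nonneg L hpos
  have hnumlt : num < split := PySem.Int.mod_lt L hpos
  rw [pv_foldl_append_map, List.nil_append, PySem.List.pyRange_one, List.map_map]
  simp only [Function.comp_def, zero_add, List.map_map, ← hnum, ← hn]
  have h0s : ((split : Int) - 0).toNat = split.toNat := by omega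
  rw [h0s]
  have hsum : ∀ (j : Nat), (j : Int) ≤ split →
      (PySem.List.slice ((List.range split.toNat).map
          (fun x : Nat => if (x : Int) < num then (1:Int) else 0)) (some 0) (some (j : Int))).sum
        = min (j : Int) num := by
    intro j hj
    rw [PySem.List.slice_zero_start, PySem.List.slice_to_natCast, ← List.map_take,
        List.take_range]
    have hmt : min j split.toNat = j := by omega
    rw [hmt, pv_sum_take]
    split_ifs <;> omega
  apply List.map_congr_left
  intro i hi
  have hi' : (i : Int) < split := by
    have := List.mem_range.mp hi; omega
  have h1 : ((i : Int) + 1) = ((i + 1 : Nat) : Int) := by push_cast; ring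
  rw [hsum i (by omega), h1, hsum (i + 1) (by omega)]
  rw [← h1]
  rfl

-- shifting a slice through a drop
theorem pv_slice_drop (l : List Int) (k a b : Int) (hk : 0 ≤ k) (ha : 0 ≤ a) (hb : 0 ≤ b) :
    PySem.List.slice (l.drop k.toNat) (some a) (some b)
      = PySem.List.slice l (some (k + a)) (some (k + b)) := by
  rw [PySem.List.slice_toNat _ ha hb, PySem.List.slice_toNat _ (by omega : (0:Int) ≤ k + a) (by omega : (0:Int) ≤ k + b),
      List.drop_drop]
  have h1 : k.toNat + a.toNat = (k + a).toNat := by omega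
  have h2 : b.toNat - a.toNat = (k + b).toNat - (k + a).toNat := by omega
  rw [h1, h2]

-- B's loop equals the closed-form boundary map, by induction on the counter
theorem pv_go_spec (m : Nat) (n num : Int) (hn0 : 0 ≤ n) (hnum0 : 0 ≤ num)
    (hcase : num < (m : Int) ∨ num = 0)
    (l : List Int) (hL : (l.length : Int) = n * (m : Int) + num) (acc : List (List Int)) :
    splitAltGo l (m : Int) acc
      = acc ++ (List.range m).map (fun i : Nat =>
          PySem.List.slice l (some (pvBnd n num (i : Int))) (some (pvBnd n num ((i : Int) + 1)))) := by
  induction m generalizing num l acc with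
  | zero =>
    rw [splitAltGo]
    simp
  | succ m ih =>
    have hs : (0:Int) < ((m + 1 : Nat) : Int) := by push_cast; omega
    rw [splitAltGo]
    simp only [dif_pos hs]
    have hLc : (l.length : Int) = n * (m : Int) + n + num := by
      push_cast at hL ⊢; nlinarith [hL]
    have hk : -(PySem.Int.floordiv (-(l.length : Int)) ((m + 1 : Nat) : Int))
        = n + (if 0 < num then 1 else 0) := by
      rw [PySem.Int.neg_floordiv_neg_eq_iff_of_pos hs]
      push_cast
      have hnm : num = 0 ∨ num ≤ (m : Int) := by
        rcases hcase with h | h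
        · right; push_cast at h; omega
        · left; exact h
      split_ifs with h
      · have h1 : num ≤ (m : Int) := by omega
        constructor <;> nlinarith [hLc]
      · have h0 : num = 0 := by omega
        constructor <;> nlinarith [hLc]
    rw [hk]
    set k : Int := n + (if 0 < num then 1 else 0) with hkdef
    have hk0 : 0 ≤ k := by rw [hkdef]; split_ifs <;> omega
    have hkL : k ≤ (l.length : Int) := by
      have hnm : 0 ≤ n * (m : Int) := by positivity
      rw [hkdef]; split_ifs with h <;> omega
    set num' : Int := if 0 < num then num - 1 else 0 with hnum'
    have hnum'0 : 0 ≤ num' := by rw [hnum']; split_ifs <;> omega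
    have hcase' : num' < (m : Int) ∨ num' = 0 := by
      rw [hnum']; split_ifs with h
      · left; push_cast at hcase; omega
      · right; rfl
    have hrest : PySem.List.slice l (some k) none = l.drop k.toNat :=
      PySem.List.slice_from _ hk0
    have hm1 : ((m + 1 : Nat) : Int) - 1 = (m : Int) := by push_cast; ring
    have hL' : ((l.drop k.toNat).length : Int) = n * (m : Int) + num' := by
      rw [List.length_drop]
      have : (k.toNat : Int) = k := Int.toNat_of_nonneg hk0
      rw [hkdef] at this ⊢
      rw [hnum']
      split_ifs at this ⊢ <;> omega
    rw [hrest, hm1, ih num' hnum'0 hcase' (l.drop k.toNat) hL' _]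
    rw [List.append_assoc, List.range_succ_eq_map, List.map_cons, List.map_map]
    congr 1
    rw [List.singleton_append]
    have hhead : PySem.List.slice l none (some k)
        = PySem.List.slice l (some (pvBnd n num 0)) (some (pvBnd n num (0 + 1))) := by
      have h0 : pvBnd n num 0 = 0 := by unfold pvBnd; omega
      have h1 : pvBnd n num (0 + 1) = k := by
        unfold pvBnd; rw [hkdef]; split_ifs <;> omega
      rw [h0, h1, PySem.List.slice_zero_start]
    rw [hhead]
    congr 1
    apply List.map_congr_left
    intro i _
    have hb0 : 0 ≤ pvBnd n num' (i : Int) := by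
      unfold pvBnd
      have : 0 ≤ (i : Int) * n := by positivity
      omega
    have hb1 : 0 ≤ pvBnd n num' ((i : Int) + 1) := by
      unfold pvBnd
      have : 0 ≤ ((i : Int) + 1) * n := by positivity
      omega
    rw [pv_slice_drop l k _ _ hk0 hb0 hb1]
    have hshift : ∀ (j : Int), 0 ≤ j → k + pvBnd n num' j = pvBnd n num (j + 1) := by
      intro j hj
      unfold pvBnd
      have hr : (j + 1) * n = j * n + n := by ring
      rw [hr, hkdef, hnum']
      have hmin : (if 0 < num then (1:Int) else 0) + min j (if 0 < num then num - 1 else 0)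
          = min (j + 1) num := by split_ifs <;> omega
      linarith [hmin]
    have hsc : ((i : Int) + 1) + 1 = (i : Int) + 1 + 1 := rfl
    rw [hshift (i : Int) (by positivity), hshift ((i : Int) + 1) (by positivity)]
    have hcast : ((i.succ : Nat) : Int) = (i : Int) + 1 := by push_cast; ring
    rw [Function.comp_def]
    simp only [hcast]

theorem split_n_py_spec : Claim_equal_split_n_py := by
  intro file_list split _ hpre
  unfold Spec_split_n_py split_n_py_alt
  by_cases hpos : 0 < split
  · set L : Int := (file_list.length : Int) with hLdef
    set n : Int := PySem.Int.floordiv L split with hn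
    set num : Int := PySem.Int.mod L split with hnum
    have hs : ((split.toNat : Nat) : Int) = split := Int.toNat_of_nonneg (le_of_lt hpos)
    have hn0 : 0 ≤ n := by
      rw [hn, PySem.Int.le_floordiv_iff_mul_le hpos, zero_mul, hLdef]
      positivity
    have hnum0 : 0 ≤ num := PySem.Int.mod_nonneg L hpos
    have hL : L = n * split + num := by
      have := PySem.Int.floordiv_mul_add_mod L split
      rw [← hn, ← hnum] at this
      linarith [this]
    have hcase : num < ((split.toNat : Nat) : Int) ∨ num = 0 := by
      left; rw [hs]; exact PySem.Int.mod_lt L hpos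
    have hgo := pv_go_spec split.toNat n num hn0 hnum0 hcase file_list
      (by rw [hs, ← hLdef, hL]) []
    rw [hs] at hgo
    rw [hgo, List.nil_append, pv_A_eq_map file_list split hpos]
  · have hA : split_n_py file_list split = [] := by
      unfold split_n_py
      rw [PySem.List.pyRange_one]
      have h0 : ((split : Int) - 0).toNat = 0 := by omega
      rw [h0]
      rfl
    rw [hA, splitAltGo, dif_neg hpos]
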